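-- pv_equiv track=rewrite | github.com/Samuel787/Kattis-LeetCode | 0861-score-after-flipping-matrix/0861-score-after-flipping-matrix.py | calculateRow
-- ===== SOURCE A (Python) =====
-- def calculateRow(row):
--     power = 0
--     total = 0
--     for i in range(len(row) - 1, -1, -1):
--         if (row[i] == 1):
--             total += 2 ** power
--         power += 1
--     return total
-- ===== SOURCE B (Python) =====
-- def calculateRow(row):
--     total = 0
--     for x in row:
--         total = total * 2 + (1 if x == 1 else 0)
--     return total
-- ===== Notes on version B (the rewrite author's own statement) =====
-- stated objective: idiomatic
-- what changed: Single forward Horner pass with a doubling accumulator replaces the reverse index loop that maintains an explicit power-of-two weight.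
import Mathlib
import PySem

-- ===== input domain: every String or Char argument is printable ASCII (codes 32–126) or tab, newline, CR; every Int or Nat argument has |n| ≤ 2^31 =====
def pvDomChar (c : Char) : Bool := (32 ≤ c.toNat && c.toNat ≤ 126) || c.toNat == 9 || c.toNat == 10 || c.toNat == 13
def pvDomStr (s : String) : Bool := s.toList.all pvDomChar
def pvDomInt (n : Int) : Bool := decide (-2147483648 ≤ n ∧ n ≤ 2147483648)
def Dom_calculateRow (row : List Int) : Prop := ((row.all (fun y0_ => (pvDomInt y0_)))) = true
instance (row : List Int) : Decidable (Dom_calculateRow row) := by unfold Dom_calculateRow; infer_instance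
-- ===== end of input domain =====

-- B replaces the reverse index loop with a power accumulator by a single forward Horner pass (idiomatic).

-- ===== PORT A =====
def calculateRow (row : List Int) : Int :=
  (PySem.List.pyRange ((PySem.List.len row) - 1) (-1) (-1)).foldl
    (fun (st : Int × Int) i =>
      (st.1 + 1, if PySem.List.pyGetD row i 0 == 1 then st.2 + 2 ^ st.1.toNat else st.2))
    (0, 0) |>.2

-- ===== PORT B =====
def calculateRow_alt (row : List Int) : Int :=
  row.foldl (fun total x => total * 2 + (if x == 1 then 1 else 0)) 0

-- ===== PRECONDITION & SPEC =====
def Spec_calculateRow (row : List Int) (out : Int) : Prop := out = calculateRow_alt row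
instance (row : List Int) (out : Int) : Decidable (Spec_calculateRow row out) := by unfold Spec_calculateRow; infer_instance

-- ===== CLAIM (what is proved, stated in full; the proofs are below) =====
def Claim_equal_calculateRow : Prop := ∀ (row : List Int), Dom_calculateRow row → Spec_calculateRow row (calculateRow row)

-- ===== LEMMAS AND PROOFS =====

lemma alt_take_succ (row : List Int) (m : Nat) (hm : m < row.length) :
    calculateRow_alt (row.take (m + 1))
      = 2 * calculateRow_alt (row.take m) + (if row[m] == 1 then 1 else 0) := by
  have h : row.take (m + 1) = row.take m ++ [row[m]] := by
    rw [List.take_add_one, List.getElem?_eq_getElem hm]; rfl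
  rw [h]
  unfold calculateRow_alt
  rw [List.foldl_append]
  simp only [List.foldl_cons, List.foldl_nil]
  ring

lemma loop_invariant (row : List Int) (m p : Nat) (t : Int) (hm : m ≤ row.length) :
    (PySem.List.pyRange ((m : Int) - 1) (-1) (-1)).foldl
      (fun (st : Int × Int) i =>
        (st.1 + 1, if PySem.List.pyGetD row i 0 == 1 then st.2 + 2 ^ st.1.toNat else st.2))
      ((p : Int), t)
    = ((p : Int) + m, t + 2 ^ p * calculateRow_alt (row.take m)) := by
  induction m generalizing p t with
  | zero =>
    rw [PySem.List.pyRange_neg_one_eq_nil (by omega)]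
    simp [calculateRow_alt]
  | succ m ih =>
    have hm' : m < row.length := hm
    have hcons : PySem.List.pyRange ((↑(m + 1) : Int) - 1) (-1) (-1)
        = (m : Int) :: PySem.List.pyRange ((m : Int) - 1) (-1) (-1) := by
      have := PySem.List.pyRange_neg_one_cons (a := ((m + 1 : Nat) : Int) - 1) (b := -1) (by push_cast; omega)
      simpa using this
    have hget : PySem.List.pyGetD row ((m : Int)) 0 = row[m] := by
      simp [List.getElem?_eq_getElem hm']
    rw [hcons]
    simp only [List.foldl_cons, hget, Int.toNat_natCast]
    have hst : (((p : Int) + 1, if (row[m] == 1) = true then t + 2 ^ p else t) : Int × Int)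
        = (((p + 1 : Nat) : Int), t + (if (row[m] == 1) = true then 1 else 0) * 2 ^ p) := by
      split <;> simp
    rw [hst, ih (p + 1) _ (by omega), alt_take_succ row m hm']
    simp only [Prod.mk.injEq]
    constructor
    · push_cast; ring
    · ring

-- ===== VERDICT (by name: the statement is the Claim_ definition above) =====
theorem calculateRow_spec : Claim_equal_calculateRow := by
  intro row _
  show calculateRow row = calculateRow_alt row
  unfold calculateRow
  have := loop_invariant row row.length 0 0 le_rfl
  simp only [PySem.List.len_eq, Nat.cast_zero] at this ⊢
  rw [this]
  simp
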